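-- pv_equiv track=rewrite | github.com/jramaswami/Binary_Search_Python | sort_string_by_flipping.py | solve
-- ===== SOURCE A (Python) =====
-- def solve(S):
--     ys_left = [0 for _ in S]
--     xs_right = [0 for _ in S]
--
--     curr_ys = 0
--     for i, c in enumerate(S):
--         ys_left[i] = curr_ys
--         if c == 'y':
--             curr_ys += 1
--
--     curr_xs = 0
--     for off, c in enumerate(reversed(S)):
--         i = len(S) - 1 - off
--         xs_right[i] = curr_xs
--         if c == 'x':
--             curr_xs += 1
--
--     soln = len(S)
--     for yl, xr in zip(ys_left, xs_right):
--         soln = min(soln, yl + xr)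
--     return soln
-- ===== SOURCE B (Python) =====
-- def solve(S):
--     ones = 0
--     res = 0
--     for c in S:
--         if c == 'y':
--             ones += 1
--         elif c == 'x':
--             res = min(res + 1, ones)
--     return res
-- ===== Notes on version B (the rewrite author's own statement) =====
-- stated objective: simpler
-- what changed: Replaced the two auxiliary prefix/suffix count arrays and the final min-scan over their zip with a single left-to-right DP keeping only two integers (ys seen, best flips so far); one pass, no allocation.
import Mathlib
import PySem

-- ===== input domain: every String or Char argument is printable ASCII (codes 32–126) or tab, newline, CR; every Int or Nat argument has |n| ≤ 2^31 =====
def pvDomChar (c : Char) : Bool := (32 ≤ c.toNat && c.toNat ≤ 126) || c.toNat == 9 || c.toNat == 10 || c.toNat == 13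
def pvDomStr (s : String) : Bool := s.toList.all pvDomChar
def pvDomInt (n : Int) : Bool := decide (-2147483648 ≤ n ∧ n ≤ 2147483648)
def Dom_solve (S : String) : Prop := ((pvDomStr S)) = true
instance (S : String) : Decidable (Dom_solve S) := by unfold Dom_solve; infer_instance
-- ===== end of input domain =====

-- B replaces A's two auxiliary count arrays with a single two-counter left-to-right DP (simpler: O(1) extra space).

-- ===== PORT A =====
-- the first loop: walk S assigning the running 'y' count to each position in order
def buildYs : List Char → Int → List Int
  | [], _ => []
  | c :: t, curr => curr :: buildYs t (if c = 'y' then curr + 1 else curr)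

-- the second loop: walk reversed S assigning the running 'x' count (to positions from the end)
def buildXs : List Char → Int → List Int
  | [], _ => []
  | c :: t, curr => curr :: buildXs t (if c = 'x' then curr + 1 else curr)

def solve (S : String) : Int :=
  let L := S.toList
  let ysLeft := buildYs L 0
  let xsRight := (buildXs L.reverse 0).reverse
  (List.zip ysLeft xsRight).foldl (fun soln p => min soln (p.1 + p.2)) (L.length : Int)

-- ===== PORT B =====
def solve_alt (S : String) : Int :=
  (S.toList.foldl (fun st c =>
      if c = 'y' then (st.1 + 1, st.2)
      else if c = 'x' then (st.1, min (st.2 + 1) st.1)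
      else st) ((0 : Int), (0 : Int))).2

-- ===== PRECONDITION & SPEC =====
def Spec_solve (S : String) (out : Int) : Prop := out = solve_alt S
instance (S : String) (out : Int) : Decidable (Spec_solve S out) := by unfold Spec_solve; infer_instance

-- ===== CLAIM (what is proved, stated in full; the proofs are below) =====
def Claim_equal_solve : Prop := ∀ (S : String), Dom_solve S → Spec_solve S (solve S)

-- ===== LEMMAS AND PROOFS =====

-- number of 'x' in a list
def xcnt : List Char → Int
  | [] => 0
  | c :: t => (if c = 'x' then 1 else 0) + xcnt t

-- A's value, recursively: min over i of (#y left of i + #x right of i), capped by the length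
def Hfun : List Char → Int
  | [] => 0
  | c :: t => min (xcnt t) ((if c = 'y' then 1 else 0) + Hfun t)

-- B's value, recursively: min over split points k of (#y in take k + #x in drop k)
def Gfun : List Char → Int
  | [] => 0
  | c :: t => min (xcnt (c :: t)) ((if c = 'y' then 1 else 0) + Gfun t)

theorem xcnt_nonneg (L : List Char) : 0 ≤ xcnt L := by
  induction L with
  | nil => simp [xcnt]
  | cons c t ih => simp only [xcnt]; split <;> omega

theorem xcnt_le_len (L : List Char) : xcnt L ≤ L.length := by
  induction L with
  | nil => simp [xcnt]
  | cons c t ih => simp only [xcnt, List.length_cons]; split <;> push_cast <;> omega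

theorem xcnt_append (a b : List Char) : xcnt (a ++ b) = xcnt a + xcnt b := by
  induction a with
  | nil => simp [xcnt]
  | cons c t ih => simp only [List.cons_append, xcnt, ih]; ring

theorem xcnt_reverse (L : List Char) : xcnt L.reverse = xcnt L := by
  induction L with
  | nil => rfl
  | cons c t ih => simp only [List.reverse_cons, xcnt_append, ih, xcnt]; ring

theorem buildXs_append (a b : List Char) (k : Int) :
    buildXs (a ++ b) k = buildXs a k ++ buildXs b (k + xcnt a) := by
  induction a generalizing k with
  | nil => simp [buildXs, xcnt]
  | cons c t ih =>
    simp only [List.cons_append, buildXs, ih, xcnt]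
    split <;> simp <;> ring_nf

theorem xsR_cons (c : Char) (t : List Char) (k : Int) :
    (buildXs (c :: t).reverse k).reverse = (k + xcnt t) :: (buildXs t.reverse k).reverse := by
  simp [List.reverse_cons, buildXs_append, buildXs, xcnt_reverse]

theorem Hfun_le_xcnt (L : List Char) : Hfun L ≤ xcnt L := by
  cases L with
  | nil => simp [Hfun, xcnt]
  | cons c t =>
    simp only [Hfun, xcnt]
    have := xcnt_nonneg t
    split <;> omega

theorem Hfun_le_len (L : List Char) : Hfun L ≤ L.length := by
  induction L with
  | nil => simp [Hfun]
  | cons c t ih => simp only [Hfun, List.length_cons]; have := xcnt_le_len t; split <;> push_cast <;> omega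

theorem Gfun_le_xcnt (L : List Char) : Gfun L ≤ xcnt L := by
  cases L with
  | nil => simp [Gfun, xcnt]
  | cons c t => exact min_le_left _ _

theorem Hfun_eq_Gfun (L : List Char) : Hfun L = Gfun L := by
  induction L with
  | nil => rfl
  | cons c t ih =>
    have h1 := Hfun_le_xcnt t
    have h2 := Gfun_le_xcnt t
    by_cases hx : c = 'x'
    · subst hx
      rw [show Hfun ('x' :: t) = min (xcnt t) (0 + Hfun t) by simp [Hfun],
          show Gfun ('x' :: t) = min (1 + xcnt t) (0 + Gfun t) by simp [Gfun, xcnt], ih]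
      omega
    · rw [show Hfun (c :: t) = min (xcnt t) ((if c = 'y' then 1 else 0) + Hfun t) from rfl,
          show Gfun (c :: t) = min (xcnt (c :: t)) ((if c = 'y' then 1 else 0) + Gfun t) from rfl,
          show xcnt (c :: t) = (if c = 'x' then 1 else 0) + xcnt t from rfl, if_neg hx, ih]
      split <;> omega

-- A's main fold, generalized over the running 'y' count o and the accumulator s
theorem foldA_eq (L : List Char) (o s : Int) (hs : s ≤ o + L.length) :
    (List.zip (buildYs L o) ((buildXs L.reverse 0).reverse)).foldl
        (fun soln p => min soln (p.1 + p.2)) s = min s (o + Hfun L) := by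
  induction L generalizing o s with
  | nil => simp only [buildYs, List.zip_nil_left, List.foldl_nil, Hfun]
           simp at hs; omega
  | cons c t ih =>
    rw [xsR_cons c t 0]
    simp only [buildYs, List.zip_cons_cons, List.foldl_cons, zero_add]
    have hle := xcnt_le_len t
    have hstep : min s (o + xcnt t) ≤ (if c = 'y' then o + 1 else o) + t.length := by
      split <;> push_cast <;> omega
    rw [ih (if c = 'y' then o + 1 else o) _ hstep]
    simp only [Hfun]
    split <;> push_cast at hs ⊢ <;> omega

-- B's fold, generalized over the state (o, r)
theorem foldB_eq (L : List Char) (o r : Int) (hr : r ≤ o) :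
    (L.foldl (fun st c =>
      if c = 'y' then (st.1 + 1, st.2)
      else if c = 'x' then (st.1, min (st.2 + 1) st.1)
      else st) (o, r)).2 = min (r + xcnt L) (o + Gfun L) := by
  induction L generalizing o r with
  | nil => simp [xcnt, Gfun]; omega
  | cons c t ih =>
    have hg := Gfun_le_xcnt t
    simp only [List.foldl_cons]
    by_cases hy : c = 'y'
    · subst hy
      simp only [reduceIte]
      rw [ih (o + 1) r (by omega)]
      rw [show Gfun ('y' :: t) = min (xcnt ('y' :: t)) (1 + Gfun t) by simp [Gfun],
          show xcnt ('y' :: t) = xcnt t by simp [xcnt]]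
      omega
    · by_cases hx : c = 'x'
      · subst hx
        simp only [reduceIte]
        rw [if_neg hy]
        rw [ih o (min (r + 1) o) (by omega)]
        rw [show Gfun ('x' :: t) = min (xcnt ('x' :: t)) (0 + Gfun t) by simp [Gfun],
            show xcnt ('x' :: t) = 1 + xcnt t by simp [xcnt]]
        omega
      · rw [if_neg hy, if_neg hx]
        rw [ih o r hr]
        rw [show Gfun (c :: t) = min (xcnt (c :: t)) ((if c = 'y' then 1 else 0) + Gfun t) from rfl,
            show xcnt (c :: t) = (if c = 'x' then 1 else 0) + xcnt t from rfl,
            if_neg hy, if_neg hx]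
        omega

theorem solve_eq_H (S : String) : solve S = Hfun S.toList := by
  unfold solve
  rw [foldA_eq S.toList 0 (S.toList.length : Int) (by omega)]
  have := Hfun_le_len S.toList
  omega

theorem solve_alt_eq_G (S : String) : solve_alt S = Gfun S.toList := by
  unfold solve_alt
  rw [foldB_eq S.toList 0 0 le_rfl]
  have := Gfun_le_xcnt S.toList
  have := xcnt_nonneg S.toList
  omega

-- ===== VERDICT (by name: the statement is the Claim_ definition above) =====
theorem solve_spec : Claim_equal_solve := by
  intro S _
  unfold Spec_solve
  rw [solve_eq_H, solve_alt_eq_G, Hfun_eq_Gfun]
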